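-- pv_equiv track=rewrite | github.com/pc5401/my_BOJ | 백준/Silver/25631. 마트료시카 합치기/마트료시카 합치기.py | solve
-- ===== SOURCE A (Python) =====
-- def solve(N: int, dolls: list[int]) -> int:
--     dolls.sort()
--
--     doll = dolls.pop()
--     lst = [doll]
--
--     while dolls:
--         doll = dolls.pop()
--
--         flag = 0
--         for i, size in enumerate(lst):
--             if doll < size:
--                 lst[i] = doll
--                 flag = 1
--                 break
--
--         if not flag:
--             lst.append(doll)
--
--         lst.sort(reverse=True)
--
--     return len(lst)
-- ===== SOURCE B (Python) =====
-- def solve(N: int, dolls: list[int]) -> int: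
--     counts = {}
--     for d in dolls:
--         counts[d] = counts.get(d, 0) + 1
--     return max(counts.values())
-- ===== Notes on version B (the rewrite author's own statement) =====
-- stated objective: faster
-- what changed: Replaces the pop/scan/re-sort chain simulation (O(N^2 log N)) with a single counting pass: the answer equals the maximum multiplicity of any size, computed via a dict of counts.
import Mathlib
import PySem

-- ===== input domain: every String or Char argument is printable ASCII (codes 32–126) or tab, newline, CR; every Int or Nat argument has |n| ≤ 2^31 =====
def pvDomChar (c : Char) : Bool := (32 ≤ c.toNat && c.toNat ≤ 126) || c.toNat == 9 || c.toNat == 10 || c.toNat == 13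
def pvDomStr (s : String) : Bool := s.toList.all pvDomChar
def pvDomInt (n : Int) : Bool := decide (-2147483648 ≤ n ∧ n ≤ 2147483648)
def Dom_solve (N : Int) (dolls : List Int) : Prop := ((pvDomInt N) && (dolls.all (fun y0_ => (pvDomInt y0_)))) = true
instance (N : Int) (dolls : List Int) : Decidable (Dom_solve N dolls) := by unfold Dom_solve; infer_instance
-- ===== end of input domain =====

-- B replaces A's pop/scan/re-sort chain simulation with one counting pass (max multiplicity of any
-- size); objective: faster. NOTE: A sorts and empties its `dolls` argument in place, B does not
-- mutate it — the equivalence proved here is about the RETURN value only.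

-- ===== PORT A =====
-- the inner `for i, size in enumerate(lst): if doll < size: lst[i] = doll; flag = 1; break`
-- (none = the loop fell through, flag stays 0)
def pvReplaceFirstLt (doll : Int) : List Int → Option (List Int)
  | [] => none
  | x :: xs => if doll < x then some (doll :: xs) else (pvReplaceFirstLt doll xs).map (x :: ·)

-- one body of the `while dolls:` loop: scan/replace-or-append, then `lst.sort(reverse=True)`
def pvStep (doll : Int) (lst : List Int) : List Int :=
  PySem.List.sorted
    (match pvReplaceFirstLt doll lst with
     | some l => l
     | none => lst ++ [doll])
    (fun x => x) true

-- the `while dolls:` loop; `dolls.pop()` pops from the END, so the loop walks the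
-- ascending-sorted list back to front: we recurse over its reverse (cons = next pop)
def pvLoop : List Int → List Int → List Int
  | [], lst => lst
  | d :: rest, lst => pvLoop rest (pvStep d lst)

def solve (N : Int) (dolls : List Int) : Int :=
  match (PySem.List.sorted dolls (fun x => x) false).reverse with
  | [] => 0  -- unreachable under Pre_solve: `dolls.pop()` raises IndexError on an empty list
  | d :: rest => ((pvLoop rest [d]).length : Int)

-- ===== PORT B =====
def solve_alt (N : Int) (dolls : List Int) : Int :=
  -- counts = {}; for d in dolls: counts[d] = counts.get(d, 0) + 1
  let counts : PySem.Dict Int Int :=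
    dolls.foldl (fun c d => c.insert d (c.getD d 0 + 1)) PySem.Dict.empty
  -- return max(counts.values())
  match PySem.List.max? counts.values (fun x => x) with
  | some m => m
  | none => 0  -- unreachable under Pre_solve: max() of an empty sequence raises ValueError

-- ===== PRECONDITION & SPEC =====
-- Pre_ excludes only the empty doll list: there A raises IndexError (pop from an empty list)
-- and B raises ValueError (max of an empty sequence).
def Pre_solve (N : Int) (dolls : List Int) : Prop := dolls ≠ []
instance (N : Int) (dolls : List Int) : Decidable (Pre_solve N dolls) := by unfold Pre_solve; infer_instance
def pvWitness_solve : Int × List Int := (3, [2, 1, 2])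
def Spec_solve (N : Int) (dolls : List Int) (out : Int) : Prop := out = solve_alt N dolls
instance (N : Int) (dolls : List Int) (out : Int) : Decidable (Spec_solve N dolls out) := by unfold Spec_solve; infer_instance

-- ===== CLAIM (what is proved, stated in full; the proofs are below) =====
def Claim_equal_solve : Prop := ∀ (N : Int) (dolls : List Int), Dom_solve N dolls → Pre_solve N dolls → Spec_solve N dolls (solve N dolls)

-- ===== LEMMAS AND PROOFS =====

-- the maximum multiplicity of any value of l
def maxMult : List Int → Nat
  | [] => 0
  | x :: xs => max (1 + xs.count x) (maxMult xs)

lemma count_le_maxMult (w : Int) (l : List Int) : l.count w ≤ maxMult l := by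
  induction l with
  | nil => simp [maxMult]
  | cons x xs ih =>
    simp only [maxMult, List.count_cons]
    split_ifs with h
    · rw [eq_of_beq h]; omega
    · omega

lemma maxMult_mem (l : List Int) (h : l ≠ []) : ∃ v ∈ l, maxMult l = l.count v := by
  induction l with
  | nil => exact absurd rfl h
  | cons x xs ih =>
    rcases eq_or_ne xs [] with rfl | hxs
    · exact ⟨x, by simp, by simp [maxMult]⟩
    · obtain ⟨v, hv, hcv⟩ := ih hxs
      by_cases hle : 1 + xs.count x ≤ maxMult xs
      · refine ⟨v, by simp [hv], ?_⟩
        have h1 : maxMult (x :: xs) = maxMult xs := by simp only [maxMult]; omega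
        rw [h1, hcv, List.count_cons]
        split_ifs with hvx
        · exfalso; rw [← eq_of_beq hvx] at hcv; omega
        · omega
      · refine ⟨x, by simp, ?_⟩
        have h1 : maxMult (x :: xs) = 1 + xs.count x := by simp only [maxMult]; omega
        rw [h1, List.count_cons_self]
        omega

lemma maxMult_perm {l l' : List Int} (h : l.Perm l') : maxMult l = maxMult l' := by
  rcases eq_or_ne l [] with rfl | hne
  · simp [h.nil_eq.symm]
  have hne' : l' ≠ [] := by intro h0; subst h0; exact hne h.symm.nil_eq.symm
  obtain ⟨v, _, hv⟩ := maxMult_mem l hne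
  obtain ⟨w, _, hw⟩ := maxMult_mem l' hne'
  have h1 : maxMult l ≤ maxMult l' := by
    rw [hv, h.count_eq]; exact count_le_maxMult v l'
  have h2 : maxMult l' ≤ maxMult l := by
    rw [hw, ← h.count_eq]; exact count_le_maxMult w l
  omega

-- a descending-sorted rearrangement IS sort(reverse=True)
lemma sorted_rev_eq (l m : List Int) (h : m.Perm l) (hm : m.Pairwise (· ≥ ·)) :
    PySem.List.sorted l (fun x => x) true = m := by
  apply PySem.List.eq_of_perm_of_pairwise_le_of_injective (key := fun x : Int => -x)
    (fun a b h => by simpa using h)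
  · exact (PySem.List.sorted_perm l (fun x => x) true).trans h.symm
  · exact (PySem.List.sorted_pairwise_rev l (fun x => x)).imp (by intro a b h; simpa using h)
  · exact hm.imp (by intro a b h; simpa using h)

-- A's inner scan on the canonical state a ++ v^c: the fall-through case (doll = v, a = [])
lemma replaceFirstLt_replicate_self (c : Nat) (v : Int) :
    pvReplaceFirstLt v (List.replicate c v) = none := by
  induction c with
  | zero => rfl
  | succ n ih => simp [List.replicate_succ, pvReplaceFirstLt, ih]

lemma replaceFirstLt_cons_lt (d x : Int) (xs : List Int) (h : d < x) :
    pvReplaceFirstLt d (x :: xs) = some (d :: xs) := by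
  simp [pvReplaceFirstLt, h]

-- the main invariant: lst = a ++ v^c with a descending and all of a above v, the remaining
-- dolls all ≤ v and descending; the final chain count in closed form
lemma pvLoop_length (r : List Int) : ∀ (a : List Int) (c : Nat) (v : Int),
    1 ≤ c → a.Pairwise (· ≥ ·) → (∀ x ∈ a, v < x) →
    (∀ y ∈ r, y ≤ v) → r.Pairwise (· ≥ ·) →
    (pvLoop r (a ++ List.replicate c v)).length
      = max (a.length + c) (max (c + r.count v) (maxMult r)) := by
  induction r with
  | nil =>
    intro a c v hc _ _ _ _
    simp [pvLoop, maxMult]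
  | cons d rest ih =>
    intro a c v hc ha hav hr hrs
    have hd : d ≤ v := hr d (by simp)
    have hrest_le_d : ∀ y ∈ rest, y ≤ d := fun y hy => List.rel_of_pairwise_cons hrs hy
    have hrest_s : rest.Pairwise (· ≥ ·) := hrs.of_cons
    have hrepPW : ∀ (n : Nat) (w : Int), (List.replicate n w).Pairwise (· ≥ ·) :=
      fun n w => List.pairwise_replicate.mpr (Or.inr (le_refl w))
    rcases eq_or_lt_of_le hd with rfl | hdv
    · -- d = v : the current run continues
      cases a with
      | nil =>
        have hstep : pvStep d ([] ++ List.replicate c d) = [] ++ List.replicate (c + 1) d := by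
          unfold pvStep
          rw [show pvReplaceFirstLt d ([] ++ List.replicate c d) = none by
            simpa using replaceFirstLt_replicate_self c d]
          apply sorted_rev_eq
          · simp only [List.nil_append, List.replicate_succ']
            exact List.Perm.refl _
          · simpa using hrepPW (c + 1) d
        rw [pvLoop, hstep,
          ih [] (c + 1) d (by omega) (by simp) (by simp) hrest_le_d hrest_s]
        simp only [List.length_nil, List.count_cons_self, maxMult]
        omega
      | cons x a' =>
        have hx : d < x := hav x (by simp)
        have hstep : pvStep d ((x :: a') ++ List.replicate c d)
            = a' ++ List.replicate (c + 1) d := by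
          unfold pvStep
          rw [show pvReplaceFirstLt d ((x :: a') ++ List.replicate c d)
                = some (d :: (a' ++ List.replicate c d)) by
            simpa using replaceFirstLt_cons_lt d x (a' ++ List.replicate c d) hx]
          apply sorted_rev_eq
          · rw [List.replicate_succ', ← List.append_assoc]
            exact List.perm_append_comm
          · rw [List.pairwise_append]
            refine ⟨ha.of_cons, hrepPW (c + 1) d, ?_⟩
            intro p hp q hq
            rw [List.eq_of_mem_replicate hq]
            exact le_of_lt (hav p (List.mem_cons_of_mem x hp))
        rw [pvLoop, hstep,
          ih a' (c + 1) d (by omega) ha.of_cons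
            (fun y hy => hav y (List.mem_cons_of_mem x hy)) hrest_le_d hrest_s]
        simp only [List.length_cons, List.count_cons_self, maxMult]
        omega
    · -- d < v : a new, strictly smaller value starts its own run
      have hvcnt : (d :: rest).count v = 0 := by
        rw [List.count_eq_zero]
        intro hv
        rcases List.mem_cons.mp hv with rfl | hv
        · omega
        · have := hrest_le_d v hv; omega
      cases a with
      | nil =>
        cases c with
        | zero => omega
        | succ k =>
          have hstep : pvStep d ([] ++ List.replicate (k + 1) v)
              = List.replicate k v ++ List.replicate 1 d := by
            unfold pvStep
            rw [show pvReplaceFirstLt d ([] ++ List.replicate (k + 1) v)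
                  = some (d :: List.replicate k v) by
              simp only [List.nil_append, List.replicate_succ]
              exact replaceFirstLt_cons_lt d v _ hdv]
            apply sorted_rev_eq
            · simpa using List.perm_append_comm (l₁ := List.replicate k v) (l₂ := [d])
            · rw [List.pairwise_append]
              refine ⟨hrepPW k v, hrepPW 1 d, ?_⟩
              intro p hp q hq
              rw [List.eq_of_mem_replicate hp, List.eq_of_mem_replicate hq]
              omega
          rw [pvLoop, hstep,
            ih (List.replicate k v) 1 d (le_refl 1) (hrepPW k v)
              (fun y hy => by rw [List.eq_of_mem_replicate hy]; exact hdv)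
              hrest_le_d hrest_s]
          simp only [List.length_nil, List.length_replicate, hvcnt, maxMult]
          omega
      | cons x a' =>
        have hx : d < x := lt_trans hdv (hav x (by simp))
        have hinnerPW : (a' ++ List.replicate c v).Pairwise (· ≥ ·) := by
          rw [List.pairwise_append]
          refine ⟨ha.of_cons, hrepPW c v, ?_⟩
          intro p hp q hq
          rw [List.eq_of_mem_replicate hq]
          exact le_of_lt (hav p (List.mem_cons_of_mem x hp))
        have hinnerGT : ∀ y ∈ a' ++ List.replicate c v, d < y := by
          intro y hy
          rcases List.mem_append.mp hy with hy | hy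
          · exact lt_trans hdv (hav y (List.mem_cons_of_mem x hy))
          · rw [List.eq_of_mem_replicate hy]; exact hdv
        have hstep : pvStep d ((x :: a') ++ List.replicate c v)
            = (a' ++ List.replicate c v) ++ List.replicate 1 d := by
          unfold pvStep
          rw [show pvReplaceFirstLt d ((x :: a') ++ List.replicate c v)
                = some (d :: (a' ++ List.replicate c v)) by
            simpa using replaceFirstLt_cons_lt d x (a' ++ List.replicate c v) hx]
          apply sorted_rev_eq
          · simpa using List.perm_append_comm (l₁ := a' ++ List.replicate c v) (l₂ := [d])
          · rw [List.pairwise_append]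
            refine ⟨hinnerPW, hrepPW 1 d, ?_⟩
            intro p hp q hq
            rw [List.eq_of_mem_replicate hq]
            exact le_of_lt (hinnerGT p hp)
        rw [pvLoop, hstep,
          ih (a' ++ List.replicate c v) 1 d (le_refl 1) hinnerPW hinnerGT
            hrest_le_d hrest_s]
        simp only [List.length_cons, List.length_append, List.length_replicate, hvcnt, maxMult]
        omega

-- A computes the maximum multiplicity of the (descending-sorted) input
lemma solve_eq_maxMult (N : Int) (dolls : List Int) (h : dolls ≠ []) :
    solve N dolls = (maxMult dolls : Int) := by
  unfold solve
  have hperm : (PySem.List.sorted dolls (fun x => x) false).reverse.Perm dolls :=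
    (List.reverse_perm _).trans (PySem.List.sorted_perm dolls (fun x => x) false)
  have hpw : (PySem.List.sorted dolls (fun x => x) false).reverse.Pairwise (· ≥ ·) := by
    have := PySem.List.sorted_pairwise dolls (fun x => x)
    simpa [List.pairwise_reverse] using this
  cases hrev : (PySem.List.sorted dolls (fun x => x) false).reverse with
  | nil =>
    exact absurd (List.perm_nil.mp ((hrev ▸ hperm).symm)) h
  | cons d rest =>
    rw [hrev] at hperm hpw
    have hloop := pvLoop_length rest [] 1 d (le_refl 1) (by simp) (by simp)
      (fun y hy => List.rel_of_pairwise_cons hpw hy) hpw.of_cons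
    simp only [List.nil_append, List.replicate_one] at hloop
    show ((pvLoop rest [d]).length : Int) = _
    rw [hloop]
    have : maxMult dolls = maxMult (d :: rest) := maxMult_perm hperm.symm
    rw [this, show maxMult (d :: rest) = max (1 + rest.count d) (maxMult rest) from rfl]
    congr 1
    simp only [List.length_nil]
    omega

-- B computes the maximum multiplicity of the input
lemma solve_alt_eq_maxMult (N : Int) (dolls : List Int) (h : dolls ≠ []) :
    solve_alt N dolls = (maxMult dolls : Int) := by
  have hrw : solve_alt N dolls
      = (match PySem.List.max? (PySem.Dict.counter dolls).values (fun x => x) with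
         | some m => m | none => 0) := by
    unfold solve_alt
    rw [PySem.Dict.foldl_insert_getD_add_one_eq_counter]
  rw [hrw]
  have hvals : (PySem.Dict.counter dolls).values
      = (PySem.Set.ofList dolls).map (fun k => (dolls.count k : Int)) := by
    show ((PySem.Dict.counter dolls).items).map (·.2) = _
    rw [PySem.Dict.items_counter dolls, List.map_map]
    rfl
  obtain ⟨v, hv, hcv⟩ := maxMult_mem dolls h
  have hvset : v ∈ PySem.Set.ofList dolls := (PySem.Set.mem_ofList dolls v).mpr hv
  have hvals_ne : (PySem.Dict.counter dolls).values ≠ [] := by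
    rw [hvals]
    intro h0
    rw [List.map_eq_nil_iff] at h0
    rw [h0] at hvset
    simp at hvset
  cases hmax : PySem.List.max? (PySem.Dict.counter dolls).values (fun x => x) with
  | none =>
    rw [PySem.List.max?_eq_none_iff] at hmax
    exact absurd hmax hvals_ne
  | some m =>
    show m = (maxMult dolls : Int)
    have hmem := PySem.List.max?_mem hmax
    have hismax := PySem.List.max?_isMax hmax
    rw [hvals] at hmem hismax
    obtain ⟨k, hk, hkm⟩ := List.mem_map.mp hmem
    have hk' : k ∈ dolls := (PySem.Set.mem_ofList dolls k).mp hk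
    have h1 : m ≤ (maxMult dolls : Int) := by
      rw [← hkm]
      exact_mod_cast count_le_maxMult k dolls
    have h2 : (maxMult dolls : Int) ≤ m := by
      have := hismax ((dolls.count v : Int)) (List.mem_map.mpr ⟨v, hvset, rfl⟩)
      simp only at this
      rw [hcv]
      exact_mod_cast this
    omega

-- ===== VERDICT (by name: the statement is the Claim_ definition above) =====
theorem solve_spec : Claim_equal_solve := by
  intro N dolls _ hpre
  unfold Spec_solve
  rw [solve_eq_maxMult N dolls hpre, solve_alt_eq_maxMult N dolls hpre]
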